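-- pv_equiv track=rewrite | github.com/roctbb/ai-game-engine | games/jump_maze/engine.py | _reachable_cells
-- ===== SOURCE A (Python) =====
-- _WIDTH = 12
--
-- _HEIGHT = 12
--
-- _DELTAS = {"up": (0, -1), "right": (1, 0), "down": (0, 1), "left": (-1, 0), "stay": (0, 0)}
--
-- def _transition(position: tuple[int, int], action: str, walls: set[tuple[int, int]], jumps: dict[tuple[int, int], int]) -> tuple[tuple[int, int], int]:
--     if action == "stay":
--         return position, 0
--     distance = jumps.get(position, 1)
--     dx, dy = _DELTAS[action]
--     target = (position[0] + dx * distance, position[1] + dy * distance)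
--     if not _inside(target) or target in walls:
--         return position, distance
--     return target, distance
--
-- def _inside(position: tuple[int, int]) -> bool:
--     x, y = position
--     return 0 <= x < _WIDTH and 0 <= y < _HEIGHT
--
-- def _reachable_cells(start: tuple[int, int], walls: set[tuple[int, int]], jumps: dict[tuple[int, int], int]) -> set[tuple[int, int]]:
--     queue = [start]
--     seen = {start}
--     head = 0
--     while head < len(queue):
--         current = queue[head]
--         head += 1
--         for action in ("up", "right", "down", "left"):
--             nxt, _distance = _transition(current, action, walls, jumps)
--             if nxt in seen:
--                 continue
--             seen.add(nxt)
--             queue.append(nxt)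
--     return seen
-- ===== SOURCE B (Python) =====
-- _WIDTH = 12
--
-- _HEIGHT = 12
--
--
-- def _successors(cell, walls, jumps):
--     # all four one-action results from `cell`, with the jump distance looked up ONCE
--     x, y = cell
--     d = jumps.get(cell, 1)
--     out = []
--     for dx, dy in ((0, -1), (1, 0), (0, 1), (-1, 0)):
--         t = (x + dx * d, y + dy * d)
--         out.append(t if 0 <= t[0] < _WIDTH and 0 <= t[1] < _HEIGHT and t not in walls else cell)
--     return out
--
--
-- def _reachable_cells(start, walls, jumps):
--     def walk(pending, seen):
--         if not pending:
--             return seen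
--         cell, rest = pending[0], pending[1:]
--         fresh = []
--         for t in _successors(cell, walls, jumps):
--             if t not in seen and t not in fresh:
--                 fresh.append(t)
--         return walk(rest + fresh, seen + fresh)
--     return set(walk([start], [start]))
-- ===== Notes on version B (the rewrite author's own statement) =====
-- stated objective: alternative
-- what changed: A's imperative queue+head-index BFS, which re-looks-up the jump distance and re-dispatches on action strings for every one of the four moves, is replaced by a pure tail-recursive worklist over a per-cell successor list built once per cell (distance looked up once, no action strings, no _transition/_DELTAS machinery).
import Mathlib
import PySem

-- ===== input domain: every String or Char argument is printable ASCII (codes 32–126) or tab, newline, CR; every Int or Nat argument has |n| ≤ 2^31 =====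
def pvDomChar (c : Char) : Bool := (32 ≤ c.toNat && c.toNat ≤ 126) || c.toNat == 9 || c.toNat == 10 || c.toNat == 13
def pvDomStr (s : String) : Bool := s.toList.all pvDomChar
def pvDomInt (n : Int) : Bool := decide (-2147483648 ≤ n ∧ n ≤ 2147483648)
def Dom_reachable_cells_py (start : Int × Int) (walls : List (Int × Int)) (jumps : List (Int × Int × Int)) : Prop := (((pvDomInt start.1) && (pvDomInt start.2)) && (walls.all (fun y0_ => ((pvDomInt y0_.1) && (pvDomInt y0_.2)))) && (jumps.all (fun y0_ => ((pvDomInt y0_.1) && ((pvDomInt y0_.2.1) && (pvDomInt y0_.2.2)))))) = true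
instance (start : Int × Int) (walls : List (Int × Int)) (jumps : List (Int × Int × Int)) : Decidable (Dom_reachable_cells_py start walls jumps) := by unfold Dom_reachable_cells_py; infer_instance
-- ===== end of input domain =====

-- B replaces A's imperative queue+head-index BFS (string-keyed _transition called per action,
-- distance re-looked-up four times per cell) by a pure tail-recursive worklist over a per-cell
-- successor list built once per cell (objective: alternative decomposition, same cost).

-- ===== PORT A =====
-- jumps.get(position, 1) — first-match lookup on the association list
def pvJumpGet (jumps : List (Int × Int × Int)) (pos : Int × Int) : Int :=
  match jumps with
  | [] => 1
  | (a, b, d) :: rest => if a = pos.1 ∧ b = pos.2 then d else pvJumpGet rest pos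

-- _inside
def pvInside (p : Int × Int) : Bool :=
  decide (0 ≤ p.1) && decide (p.1 < 12) && decide (0 ≤ p.2) && decide (p.2 < 12)

-- _DELTAS lookup
def pvDelta (action : String) : Int × Int :=
  if action = "up" then (0, -1)
  else if action = "right" then (1, 0)
  else if action = "down" then (0, 1)
  else if action = "left" then (-1, 0)
  else (0, 0)

-- _transition
def pvTransition (position : Int × Int) (action : String) (walls : List (Int × Int)) (jumps : List (Int × Int × Int)) : (Int × Int) × Int :=
  if action = "stay" then (position, 0)
  else
    let distance := pvJumpGet jumps position
    let d := pvDelta action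
    let target := (position.1 + d.1 * distance, position.2 + d.2 * distance)
    if !pvInside target || walls.contains target then (position, distance)
    else (target, distance)

-- A's while loop: queue grows in place, head is an index, seen is updated inside the
-- inner action loop. fuel is a totality guard only: seen holds distinct cells, each the
-- start or inside the 12×12 grid, so the Python loop runs at most 145 iterations.
def pvLoopA (fuel : Nat) (walls : List (Int × Int)) (jumps : List (Int × Int × Int)) (queue seen : List (Int × Int)) (head : Nat) : List (Int × Int) :=
  match fuel with
  | 0 => seen
  | fuel + 1 =>
    if head < queue.length then
      match PySem.List.pyGet? queue (Int.ofNat head) with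
      | none => seen
      | some current =>
        let sq := ["up", "right", "down", "left"].foldl
          (fun (sq : List (Int × Int) × List (Int × Int)) action =>
            let nxt := (pvTransition current action walls jumps).1
            if sq.1.contains nxt then sq else (sq.1 ++ [nxt], sq.2 ++ [nxt]))
          (seen, queue)
        pvLoopA fuel walls jumps sq.2 sq.1 (head + 1)
    else seen

def reachable_cells_py (start : Int × Int) (walls : List (Int × Int)) (jumps : List (Int × Int × Int)) : List (Int × Int) :=
  pvLoopA 1000 walls jumps [start] [start] 0

-- ===== PORT B =====
-- _successors: the four one-action results from c, with the jump distance looked up once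
def pvStep (walls : List (Int × Int)) (jumps : List (Int × Int × Int)) (c : Int × Int) : List (Int × Int) :=
  let d := ((jumps.find? (fun e => e.1 == c.1 && e.2.1 == c.2)).map (fun e => e.2.2)).getD 1
  [((0 : Int), (-1 : Int)), (1, 0), (0, 1), (-1, 0)].map (fun dd =>
    let t := (c.1 + dd.1 * d, c.2 + dd.2 * d)
    if 0 ≤ t.1 ∧ t.1 < 12 ∧ 0 ≤ t.2 ∧ t.2 < 12 ∧ t ∉ walls then t else c)

-- walk: pure tail recursion on the worklist; same fuel guard as A's port.
def pvWalk (fuel : Nat) (walls : List (Int × Int)) (jumps : List (Int × Int × Int)) (pending seen : List (Int × Int)) : List (Int × Int) :=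
  match fuel with
  | 0 => seen
  | fuel + 1 =>
    match pending with
    | [] => seen
    | cell :: rest =>
      let fresh := (pvStep walls jumps cell).foldl
        (fun (fresh : List (Int × Int)) t =>
          if seen.contains t || fresh.contains t then fresh else fresh ++ [t]) []
      pvWalk fuel walls jumps (rest ++ fresh) (seen ++ fresh)

def reachable_cells_py_alt (start : Int × Int) (walls : List (Int × Int)) (jumps : List (Int × Int × Int)) : List (Int × Int) :=
  pvWalk 1000 walls jumps [start] [start]

-- ===== PRECONDITION & SPEC =====
def Spec_reachable_cells_py (start : Int × Int) (walls : List (Int × Int)) (jumps : List (Int × Int × Int)) (out : List (Int × Int)) : Prop := out = reachable_cells_py_alt start walls jumps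
instance (start : Int × Int) (walls : List (Int × Int)) (jumps : List (Int × Int × Int)) (out : List (Int × Int)) : Decidable (Spec_reachable_cells_py start walls jumps out) := by unfold Spec_reachable_cells_py; infer_instance

-- ===== CLAIM (what is proved, stated in full; the proofs are below) =====
def Claim_equal_reachable_cells_py : Prop := ∀ (start : Int × Int) (walls : List (Int × Int)) (jumps : List (Int × Int × Int)), Dom_reachable_cells_py start walls jumps → Spec_reachable_cells_py start walls jumps (reachable_cells_py start walls jumps)

-- ===== LEMMAS AND PROOFS =====

-- B's distance lookup equals A's recursive association-list lookup
theorem pvDist_eq (jumps : List (Int × Int × Int)) (c : Int × Int) :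
    ((jumps.find? (fun e => e.1 == c.1 && e.2.1 == c.2)).map (fun e => e.2.2)).getD 1
      = pvJumpGet jumps c := by
  induction jumps with
  | nil => rfl
  | cons e rest ih =>
    obtain ⟨a, b, d⟩ := e
    by_cases h : a = c.1 ∧ b = c.2
    · simp [pvJumpGet, List.find?, h.1, h.2]
    · rw [pvJumpGet, if_neg h]
      rw [List.find?]
      have : ((a, b, d).1 == c.1 && (a, b, d).2.1 == c.2) = false := by
        by_cases h1 : a = c.1 <;> simp_all
      rw [this]
      exact ih

-- B's successor list is the list of A's one-action transition results, in action order
theorem pvStep_eq (walls : List (Int × Int)) (jumps : List (Int × Int × Int)) (c : Int × Int) :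
    pvStep walls jumps c
      = ["up", "right", "down", "left"].map (fun a => (pvTransition c a walls jumps).1) := by
  unfold pvStep pvTransition pvDelta
  rw [pvDist_eq]
  simp only [List.map]
  norm_num
  refine ⟨?_, ?_, ?_, ?_⟩ <;>
  · split_ifs with h1 h2 <;>
      simp_all [pvInside, Bool.and_eq_true, decide_eq_true_eq, decide_eq_false_iff_not]

-- A's inner fold over the actions, started on (seen, queue), appends to both components
-- exactly the fresh batch that B's inner dedup fold collects relative to seen.
theorem pv_inner (current : Int × Int) (walls : List (Int × Int)) (jumps : List (Int × Int × Int)) :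
    ∀ (L : List String) (seen fresh queue : List (Int × Int)),
      L.foldl
        (fun (sq : List (Int × Int) × List (Int × Int)) action =>
          let nxt := (pvTransition current action walls jumps).1
          if sq.1.contains nxt then sq else (sq.1 ++ [nxt], sq.2 ++ [nxt]))
        (seen ++ fresh, queue ++ fresh)
      = (seen ++ L.foldl
            (fun (fresh : List (Int × Int)) action =>
              let nxt := (pvTransition current action walls jumps).1
              if seen.contains nxt || fresh.contains nxt then fresh else fresh ++ [nxt])
            fresh,
         queue ++ L.foldl
            (fun (fresh : List (Int × Int)) action =>
              let nxt := (pvTransition current action walls jumps).1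
              if seen.contains nxt || fresh.contains nxt then fresh else fresh ++ [nxt])
            fresh) := by
  intro L
  induction L with
  | nil => intro seen fresh queue; simp
  | cons a L ih =>
    intro seen fresh queue
    simp only [List.foldl_cons]
    rw [List.contains_append]
    by_cases h : (seen.contains (pvTransition current a walls jumps).1
        || fresh.contains (pvTransition current a walls jumps).1) = true
    · rw [if_pos h, if_pos h]
      exact ih seen fresh queue
    · rw [if_neg h, if_neg h]
      rw [List.append_assoc seen, List.append_assoc queue]
      exact ih seen (fresh ++ [(pvTransition current a walls jumps).1]) queue

-- bisimulation: A's loop at (queue, head) equals B's recursion on queue.drop head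
theorem pv_bisim (walls : List (Int × Int)) (jumps : List (Int × Int × Int)) :
    ∀ (fuel : Nat) (queue seen : List (Int × Int)) (head : Nat),
      pvLoopA fuel walls jumps queue seen head = pvWalk fuel walls jumps (queue.drop head) seen := by
  intro fuel
  induction fuel with
  | zero => intro queue seen head; rfl
  | succ fuel ih =>
    intro queue seen head
    by_cases h : head < queue.length
    · have hget : PySem.List.pyGet? queue (Int.ofNat head) = some queue[head] := by
        simp [PySem.List.pyGet?_eq_some_getElem (xs := queue) (i := (head : Int))
          (Int.natCast_nonneg head) (by exact_mod_cast h)]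
      have hdrop : queue.drop head = queue[head] :: queue.drop (head + 1) :=
        List.drop_eq_getElem_cons h
      rw [pvLoopA, if_pos h, hget, hdrop, pvWalk]
      dsimp only
      rw [pvStep_eq, List.foldl_map]
      have hin := pv_inner queue[head] walls jumps ["up", "right", "down", "left"] seen [] queue
      simp only [List.append_nil] at hin
      rw [hin]
      rw [ih]
      congr 1
      rw [List.drop_append_of_le_length (by omega)]
    · have hdrop : queue.drop head = [] := List.drop_eq_nil_of_le (by omega)
      rw [pvLoopA, if_neg h, hdrop, pvWalk]

-- ===== VERDICT (by name: the statement is the Claim_ definition above) =====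
theorem reachable_cells_py_spec : Claim_equal_reachable_cells_py := by
  intro start walls jumps _
  unfold Spec_reachable_cells_py reachable_cells_py reachable_cells_py_alt
  exact pv_bisim walls jumps 1000 [start] [start] 0
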